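-- pv_equiv track=rewrite | github.com/mikewoodhouse/aoc2022 | day03.py | part2
-- ===== SOURCE A (Python) =====
-- def item_score(item):
--     return ord(item) - ord("a") + 1 if "a" <= item <= "z" else ord(item) - ord("A") + 27
--
-- def part2(data):
--     """Solve part 2."""
--     groups = [data[i : i + 3] for i in range(0, len(data), 3)]
--     total = 0
--     for group in groups:
--         sets = [set(sack) for sack in group]
--         common_01 = sets[0].intersection(sets[1])
--         common_012 = common_01.intersection(sets[2])
--         total += item_score("".join(common_012))
--     return total
-- ===== SOURCE B (Python) =====
-- def item_score(item):
--     return ord(item) - ord("a") + 1 if "a" <= item <= "z" else ord(item) - ord("A") + 27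
--
-- def part2(data):
--     """Solve part 2."""
--     total = 0
--     for i in range(0, len(data), 3):
--         counts = {}
--         for sack in data[i:i + 3]:
--             for ch in dict.fromkeys(sack):
--                 counts[ch] = counts.get(ch, 0) + 1
--         total += item_score("".join(ch for ch, n in counts.items() if n == 3))
--     return total
-- ===== Notes on version B (the rewrite author's own statement) =====
-- stated objective: idiomatic
-- what changed: Each group's common item is found by one frequency tally over the distinct characters of its three sacks (characters counted three times), replacing the two successive set intersections.
import Mathlib
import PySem

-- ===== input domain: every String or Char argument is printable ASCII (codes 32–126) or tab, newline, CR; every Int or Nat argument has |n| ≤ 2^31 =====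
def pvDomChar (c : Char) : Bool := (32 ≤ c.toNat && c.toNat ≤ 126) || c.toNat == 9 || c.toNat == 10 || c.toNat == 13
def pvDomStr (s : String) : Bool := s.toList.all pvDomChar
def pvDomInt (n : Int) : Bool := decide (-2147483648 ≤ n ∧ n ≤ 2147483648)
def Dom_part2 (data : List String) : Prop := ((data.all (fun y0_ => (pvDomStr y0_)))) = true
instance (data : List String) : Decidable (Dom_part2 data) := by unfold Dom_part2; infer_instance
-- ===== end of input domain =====

-- B replaces the two successive set intersections per 3-sack group by a single frequency tally
-- over the distinct characters of each sack, selecting the characters counted three times (objective: idiomatic).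

-- ===== PORT A =====
-- item_score: exact for single-character strings — the only inputs on which Python's ord(item)
-- returns (for any other string ord raises TypeError; those inputs are excluded by Pre_part2,
-- and the `_ => 0` arm is never reached under Pre_part2).
def itemScore (item : List Char) : Int :=
  match item with
  | [c] => if 'a' ≤ c ∧ c ≤ 'z' then (c.toNat : Int) - 97 + 1 else (c.toNat : Int) - 65 + 27
  | _ => 0

def part2 (data : List String) : Int :=
  let groups := (PySem.List.pyRange 0 (PySem.List.len data) 3).map
      (fun i => PySem.List.slice data (some i) (some (i + 3)))
  groups.foldl (fun total group =>
    match group with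
    | [sack0, sack1, sack2] =>
      let set0 := PySem.Set.ofList sack0.toList
      let set1 := PySem.Set.ofList sack1.toList
      let set2 := PySem.Set.ofList sack2.toList
      let common01 := PySem.Set.inter set0 set1
      let common012 := PySem.Set.inter common01 set2
      total + itemScore common012
    | _ => total  -- Python raises IndexError on sets[1]/sets[2] here (group shorter than 3); excluded by Pre_part2
    ) 0

-- ===== PORT B =====
def itemScoreAlt (item : List Char) : Int :=
  match item with
  | [c] => if 'a' ≤ c ∧ c ≤ 'z' then (c.toNat : Int) - 97 + 1 else (c.toNat : Int) - 65 + 27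
  | _ => 0

def part2_alt (data : List String) : Int :=
  (PySem.List.pyRange 0 (PySem.List.len data) 3).foldl (fun total i =>
    let counts := (PySem.List.slice data (some i) (some (i + 3))).foldl
      (fun (d : PySem.Dict Char Int) sack =>
        (PySem.List.dedup sack.toList).foldl (fun d ch => d.insert ch (d.getD ch 0 + 1)) d)
      PySem.Dict.empty
    total + itemScoreAlt ((counts.items.filter (fun p => p.2 == 3)).map (fun p => p.1))) 0

-- ===== PRECONDITION & SPEC =====
-- number of characters common to all three sacks of a 3-string group
def commonCount3 (g : List String) : Nat :=
  match g with
  | [s0, s1, s2] =>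
    ((PySem.List.dedup s0.toList).filter (fun c => s1.toList.contains c && s2.toList.contains c)).length
  | _ => 0

-- Pre_ excludes exactly the inputs on which the Python A raises: a length not divisible by 3
-- (IndexError on sets[1]/sets[2] of the last short group) or a group of three sacks that do not
-- share exactly one character (then "".join gives a string of length ≠ 1 and ord raises TypeError).
def Pre_part2 (data : List String) : Prop :=
  data.length % 3 = 0 ∧
  ∀ i ∈ PySem.List.pyRange 0 (PySem.List.len data) 3,
    commonCount3 (PySem.List.slice data (some i) (some (i + 3))) = 1
instance (data : List String) : Decidable (Pre_part2 data) := by unfold Pre_part2; infer_instance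

def pvWitness_part2 : List String := (["ab", "bc", "bd"])

def Spec_part2 (data : List String) (out : Int) : Prop := out = part2_alt data
instance (data : List String) (out : Int) : Decidable (Spec_part2 data out) := by unfold Spec_part2; infer_instance

-- ===== CLAIM (what is proved, stated in full; the proofs are below) =====
def Claim_equal_part2 : Prop := ∀ (data : List String), Dom_part2 data → Pre_part2 data → Spec_part2 data (part2 data)

-- ===== LEMMAS AND PROOFS =====

-- the inner tally loop of B over one sack's distinct characters
def tallyOne (d : PySem.Dict Char Int) (M : List Char) : PySem.Dict Char Int :=
  M.foldl (fun d ch => d.insert ch (d.getD ch 0 + 1)) d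

theorem itemScoreAlt_eq (l : List Char) : itemScoreAlt l = itemScore l := rfl

-- characterization of one tally pass on the items list
theorem tallyOne_items (M : List Char) (d : PySem.Dict Char Int)
    (hM : M.Nodup) (hd : d.keys.Nodup) :
    (tallyOne d M).items
      = d.items.map (fun p => (p.1, p.2 + (if p.1 ∈ M then (1:Int) else 0)))
        ++ (M.filter (fun c => !d.contains c)).map (fun c => (c, (1:Int))) := by
  induction M generalizing d with
  | nil => simp [tallyOne]
  | cons ch M ih =>
    obtain ⟨hch, hM'⟩ := List.nodup_cons.mp hM
    have step : tallyOne d (ch :: M) = tallyOne (d.insert ch (d.getD ch 0 + 1)) M := rfl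
    rw [step, ih _ hM' (PySem.Dict.nodup_keys_insert d ch _ hd)]
    rw [PySem.Dict.items_insert]
    by_cases hc : d.contains ch = true
    · rw [if_pos hc, List.map_map]
      congr 1
      · apply List.map_congr_left
        intro p hp
        by_cases hpk : p.1 = ch
        · have hv : d.getD ch 0 = p.2 := by
            rw [← hpk]
            exact PySem.Dict.getD_of_mem_items d (by simpa using hp) hd 0
          simp [Function.comp, hpk, hv, hch]
        · simp [Function.comp, hpk]
      · rw [List.filter_cons_of_neg (by simpa using hc)]
        congr 1
        apply List.filter_congr
        intro c hcM
        have hne : c ≠ ch := by rintro rfl; exact hch hcM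
        rw [PySem.Dict.contains_insert]
        simp [hne]
    · rw [if_neg hc]
      have hcf : d.contains ch = false := by simpa using hc
      have hget : d.getD ch 0 = 0 := PySem.Dict.getD_of_not_contains d 0 hcf
      rw [hget, List.map_append, List.filter_cons_of_pos (by simp [hcf])]
      have hchk : ch ∉ d.keys := fun h => by
        rw [← PySem.Dict.contains_iff_mem_keys d ch] at h; exact hc h
      rw [List.append_assoc]
      congr 1
      · apply List.map_congr_left
        intro p hp
        have hne : p.1 ≠ ch := fun h => hchk (h ▸ List.mem_map_of_mem hp)
        simp [hne]
      · simp only [List.map_cons, List.map_nil, List.singleton_append, zero_add]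
        congr 2
        · simp [hch]
        · apply List.filter_congr
          intro c hcM
          have hne : c ≠ ch := by rintro rfl; exact hch hcM
          rw [PySem.Dict.contains_insert]
          simp [hne]

theorem tallyOne_keys (d : PySem.Dict Char Int) (M : List Char) :
    (tallyOne d M).keys = PySem.Set.update d.keys M :=
  PySem.Dict.keys_foldl_insert M _ d

theorem commonKeys (s0 s1 s2 : String) :
    ((((([s0, s1, s2] : List String).foldl
        (fun (d : PySem.Dict Char Int) sack =>
          (PySem.List.dedup sack.toList).foldl (fun d ch => d.insert ch (d.getD ch 0 + 1)) d)
        PySem.Dict.empty).items.filter (fun p => p.2 == 3)).map (fun p => p.1)))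
      = PySem.Set.inter (PySem.Set.inter (PySem.Set.ofList s0.toList) (PySem.Set.ofList s1.toList))
          (PySem.Set.ofList s2.toList) := by
  have hfold : (([s0, s1, s2] : List String).foldl
        (fun (d : PySem.Dict Char Int) sack =>
          (PySem.List.dedup sack.toList).foldl (fun d ch => d.insert ch (d.getD ch 0 + 1)) d)
        PySem.Dict.empty)
      = tallyOne (tallyOne (tallyOne PySem.Dict.empty (PySem.List.dedup s0.toList))
          (PySem.List.dedup s1.toList)) (PySem.List.dedup s2.toList) := rfl
  set M0 := PySem.List.dedup s0.toList with hM0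
  set M1 := PySem.List.dedup s1.toList with hM1
  set M2 := PySem.List.dedup s2.toList with hM2
  have nd0 : M0.Nodup := PySem.Set.nodup_ofList s0.toList
  have nd1 : M1.Nodup := PySem.Set.nodup_ofList s1.toList
  have nd2 : M2.Nodup := PySem.Set.nodup_ofList s2.toList
  have hkeys_empty : (PySem.Dict.empty : PySem.Dict Char Int).keys = [] := rfl
  have hitems_empty : (PySem.Dict.empty : PySem.Dict Char Int).items = [] := rfl
  -- step 0
  have hi0 : (tallyOne PySem.Dict.empty M0).items = M0.map (fun c => (c, (1:Int))) := by
    rw [tallyOne_items M0 _ nd0 (by rw [hkeys_empty]; exact List.nodup_nil)]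
    simp [hitems_empty, PySem.Dict.contains_empty]
  have hk0 : (tallyOne PySem.Dict.empty M0).keys = M0 := by
    rw [tallyOne_keys, hkeys_empty]
    show PySem.Set.ofList M0 = M0
    exact PySem.Set.ofList_eq_self_of_nodup M0 nd0
  have hc0 : ∀ c, (tallyOne PySem.Dict.empty M0).contains c = decide (c ∈ M0) := by
    intro c
    rw [PySem.Dict.contains_eq_decide_mem_keys, hk0]
  -- step 1
  have hi1 : (tallyOne (tallyOne PySem.Dict.empty M0) M1).items
      = M0.map (fun c => (c, (1:Int) + (if c ∈ M1 then 1 else 0)))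
        ++ (M1.filter (fun c => !decide (c ∈ M0))).map (fun c => (c, (1:Int))) := by
    rw [tallyOne_items M1 _ nd1 (by rw [hk0]; exact nd0), hi0, List.map_map]
    have e2 : M1.filter (fun c => !(tallyOne PySem.Dict.empty M0).contains c)
        = M1.filter (fun c => !decide (c ∈ M0)) := by
      apply List.filter_congr; intro c _; rw [hc0]
    rw [e2]
    rfl
  have hk1nd : (tallyOne (tallyOne PySem.Dict.empty M0) M1).keys.Nodup := by
    rw [tallyOne_keys]
    exact PySem.Set.nodup_update _ _ (by rw [hk0]; exact nd0)
  have hc1 : ∀ c, (tallyOne (tallyOne PySem.Dict.empty M0) M1).contains c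
      = decide (c ∈ M0 ∨ c ∈ M1) := by
    intro c
    rw [PySem.Dict.contains_eq_decide_mem_keys, tallyOne_keys, hk0]
    simp [PySem.Set.mem_update]
  -- step 2
  rw [hfold, tallyOne_items M2 _ nd2 hk1nd, hi1]
  simp only [List.filter_append, List.filter_map, List.map_append, List.map_map]
  have hb2 : List.filter ((fun (p : Char × Int) => p.2 == 3) ∘ (fun p => (p.1, p.2 + if p.1 ∈ M2 then (1:Int) else 0)) ∘ fun c => (c, (1:Int)))
      (List.filter (fun c => !decide (c ∈ M0)) M1) = [] := by
    apply List.filter_eq_nil_iff.mpr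
    intro c _
    by_cases h : c ∈ M2 <;> simp [h]
  have hb3 : List.filter ((fun (p : Char × Int) => p.2 == 3) ∘ fun c => (c, (1:Int)))
      (List.filter (fun c => !(tallyOne (tallyOne PySem.Dict.empty M0) M1).contains c) M2) = [] := by
    apply List.filter_eq_nil_iff.mpr
    intro c _
    simp
  have hb1 : List.filter ((fun (p : Char × Int) => p.2 == 3) ∘ (fun p => (p.1, p.2 + if p.1 ∈ M2 then (1:Int) else 0)) ∘ fun c => (c, 1 + if c ∈ M1 then (1:Int) else 0)) M0
      = M0.filter (fun c => decide (c ∈ M1) && decide (c ∈ M2)) := by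
    apply List.filter_congr
    intro c _
    by_cases h1 : c ∈ M1 <;> by_cases h2 : c ∈ M2 <;> simp [h1, h2]
  rw [hb1, hb2, hb3]
  simp only [List.map_nil, List.append_nil]
  have hmap : ∀ l : List Char, List.map ((fun (p : Char × Int) => p.1) ∘ (fun p => (p.1, p.2 + if p.1 ∈ M2 then (1:Int) else 0)) ∘ fun c => (c, 1 + if c ∈ M1 then (1:Int) else 0)) l = l := by
    intro l
    induction l with
    | nil => rfl
    | cons x t ih =>
      simp only [List.map_cons, ih]
      rfl
  rw [hmap]
  show M0.filter (fun c => decide (c ∈ M1) && decide (c ∈ M2))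
      = (M0.filter (fun c => PySem.Set.contains M1 c)).filter (fun c => PySem.Set.contains M2 c)
  rw [List.filter_filter]
  apply List.filter_congr
  intro c _
  simp [PySem.Set.contains, List.contains_eq_mem, Bool.and_comm]

theorem slice_three (data : List String) (i : Int)
    (hi : i ∈ PySem.List.pyRange 0 (PySem.List.len data) 3)
    (hlen : data.length % 3 = 0) :
    ∃ s0 s1 s2, PySem.List.slice data (some i) (some (i + 3)) = [s0, s1, s2] := by
  rw [PySem.List.mem_pyRange_iff_of_pos (by norm_num)] at hi
  simp only [PySem.List.len_eq, sub_zero] at hi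
  obtain ⟨h0, hlt, hdvd⟩ := hi
  have h3 : i.toNat + 3 ≤ data.length := by omega
  have hsl : PySem.List.slice data (some i) (some (i + 3)) = (data.drop i.toNat).take 3 := by
    rw [PySem.List.slice_toNat data h0 (by omega)]
    congr 1
    omega
  have hlend : 3 ≤ (data.drop i.toNat).length := by simp; omega
  rcases hdrop : data.drop i.toNat with _ | ⟨a, _ | ⟨b, _ | ⟨c, t⟩⟩⟩ <;>
    rw [hdrop] at hlend <;> simp at hlend
  exact ⟨a, b, c, by rw [hsl, hdrop]; rfl⟩

-- ===== VERDICT (by name: the statement is the Claim_ definition above) =====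
theorem part2_spec : Claim_equal_part2 := by
  intro data _hdom hpre
  unfold Spec_part2 part2 part2_alt
  obtain ⟨hlen, _hone⟩ := hpre
  rw [List.foldl_map]
  apply PySem.List.foldl_congr_mem
  intro total i hi
  obtain ⟨s0, s1, s2, hs⟩ := slice_three data i hi hlen
  rw [hs]
  simp only []
  rw [commonKeys s0 s1 s2, itemScoreAlt_eq]
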